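-- pv_equiv track=rewrite | github.com/BrazilianFootball/WorldCup2026 | src/tournament.py | _match_thirds
-- ===== SOURCE A (Python) =====
-- def _match_thirds(
--     slots: list[tuple[int, str]],
--     qualified_groups: set[str],
-- ) -> dict[int, str]:
--     """Bipartite matching: assign each qualified 3rd-place group to a slot.
--
--     Uses backtracking to find a valid assignment where each slot gets
--     exactly one group from its allowed set.
--     """
--     allowed: list[tuple[int, list[str]]] = []
--     for idx, slot_label in slots:
--         groups_in_slot = [
--             g for g in slot_label.replace("3_", "") if g in qualified_groups
--         ]
--         allowed.append((idx, groups_in_slot))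
--
--     allowed.sort(key=lambda x: len(x[1]))
--
--     assignment: dict[int, str] = {}
--     used: set[str] = set()
--
--     def backtrack(pos: int) -> bool:
--         if pos == len(allowed):
--             return True
--         idx, candidates = allowed[pos]
--         for g in candidates:
--             if g not in used:
--                 assignment[idx] = g
--                 used.add(g)
--                 if backtrack(pos + 1):
--                     return True
--                 used.discard(g)
--                 del assignment[idx]
--         return False
--
--     if not backtrack(0):
--         raise RuntimeError(
--             f"No valid 3rd-place assignment for groups {qualified_groups}"
--         )
--     return assignment
-- ===== SOURCE B (Python) =====
-- def _match_thirds(slots, qualified_groups):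
--     allowed = sorted(
--         [(idx, [g for g in label.replace("3_", "") if g in qualified_groups])
--          for idx, label in slots],
--         key=lambda x: len(x[1]),
--     )
--
--     def feasible(pending, used):
--         """Does the remaining slot list admit an injective choice of groups?"""
--         if not pending:
--             return True
--         _, candidates = pending[0]
--         return any(
--             g not in used and feasible(pending[1:], used | {g})
--             for g in candidates
--         )
--
--     used = set()
--     pairs = []
--     for pos, (idx, candidates) in enumerate(allowed):
--         g = next(
--             (g for g in candidates
--              if g not in used and feasible(allowed[pos + 1:], used | {g})),
--             None,
--         )
--         if g is None:
--             raise RuntimeError(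
--                 f"No valid 3rd-place assignment for groups {qualified_groups}"
--             )
--         pairs.append((idx, g))
--         used.add(g)
--     return dict(pairs)
-- ===== Notes on version B (the rewrite author's own statement) =====
-- stated objective: alternative
-- what changed: Replaces A's backtracking search (shared assignment dict / used set with explicit undo on failure) by a commit-once greedy pass: each slot takes its first unused candidate for which a separate boolean feasibility oracle certifies the remaining slots stay solvable, so choices are never revised; same candidate order, hence the same assignment.
import Mathlib
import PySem

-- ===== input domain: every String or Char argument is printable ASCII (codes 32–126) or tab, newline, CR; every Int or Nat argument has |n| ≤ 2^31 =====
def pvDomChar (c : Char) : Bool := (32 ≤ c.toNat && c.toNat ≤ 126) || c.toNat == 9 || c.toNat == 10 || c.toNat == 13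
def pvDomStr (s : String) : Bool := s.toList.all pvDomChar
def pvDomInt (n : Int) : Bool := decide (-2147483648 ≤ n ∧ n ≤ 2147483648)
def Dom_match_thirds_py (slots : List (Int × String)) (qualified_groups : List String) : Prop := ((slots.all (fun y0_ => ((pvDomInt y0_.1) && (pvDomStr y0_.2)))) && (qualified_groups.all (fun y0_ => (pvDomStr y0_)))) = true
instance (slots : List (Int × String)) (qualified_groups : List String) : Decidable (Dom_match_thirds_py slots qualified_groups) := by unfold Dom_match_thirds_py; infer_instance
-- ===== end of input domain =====

-- B replaces A's backtracking (shared dict/set with explicit undo) by a commit-once greedy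
-- pass guarded by a boolean feasibility oracle on the remaining slots; same candidate order,
-- so the same assignment. Equality is about RETURN values; A mutates nothing observable.

-- ===== PORT A =====
-- [g for g in slot_label.replace("3_", "") if g in qualified_groups]  (g is a 1-char string;
-- the comprehension is textually identical in A and B, so it is a shared helper)
def pyGroupsIn (qualified_groups : List String) (slot_label : String) : List String :=
  ((PySem.Str.replace slot_label "3_" "").toList.map (fun c => String.ofList [c])).filter
    (fun g => qualified_groups.contains g)

-- def backtrack(pos): the recursion walks the suffix of `allowed` from `pos`; the shared
-- `assignment`/`used` are threaded as values, so the undo (`used.discard(g)`, `del assignment[idx]`)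
-- is the loop resuming with the pre-branch values (exact on inputs with distinct slot indices, see Pre_);
-- the inner `for g in candidates` with its early `return True` is the foldr over candidates.
def matchABacktrack : List (Int × List String) → PySem.Dict Int String → PySem.Set String →
    Option (PySem.Dict Int String)
  | [], assignment, _ => some assignment                       -- pos == len(allowed): return True
  | (idx, candidates) :: rest, assignment, used =>
      candidates.foldr (fun g acc =>
        if used.contains g = false then
          match matchABacktrack rest (assignment.insert idx g) (PySem.Set.add used g) with
          | some d => some d
          | none => acc                                        -- undo, try next candidate
        else acc) none                                         -- loop exhausted: return False

def match_thirds_py (slots : List (Int × String)) (qualified_groups : List String) :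
    List (Int × String) :=
  let allowed := slots.foldl (fun acc p => acc ++ [(p.1, pyGroupsIn qualified_groups p.2)]) []
  let allowedSorted := PySem.List.sorted allowed (fun x => x.2.length) false
  match matchABacktrack allowedSorted PySem.Dict.empty PySem.Set.empty with
  | some assignment => assignment.items
  | none => []                                                 -- Python raises RuntimeError (outside Pre_)

-- ===== PORT B =====
-- def feasible(pending, used): any(g not in used and feasible(pending[1:], used | {g}) for g in candidates)
-- (used | {g} on a one-element set literal is PySem.Set.add used g)
def matchBFeasible : List (Int × List String) → PySem.Set String → Bool
  | [], _ => true
  | (_, candidates) :: rest, used =>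
      candidates.any (fun g => !used.contains g && matchBFeasible rest (PySem.Set.add used g))

-- the for-loop over `allowed` accumulating `pairs`: structural recursion returning the pairs
-- list; `next((g for g in candidates if …), None)` is find?, `g is None` the none branch
def matchBAssign : List (Int × List String) → PySem.Set String → Option (List (Int × String))
  | [], _ => some []
  | (idx, candidates) :: rest, used =>
      match candidates.find? (fun g => !used.contains g && matchBFeasible rest (PySem.Set.add used g)) with
      | some g => (matchBAssign rest (PySem.Set.add used g)).map (fun tail => (idx, g) :: tail)
      | none => none                                           -- raise RuntimeError (outside Pre_)

def match_thirds_py_alt (slots : List (Int × String)) (qualified_groups : List String) :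
    List (Int × String) :=
  let allowed := PySem.List.sorted (slots.map (fun p => (p.1, pyGroupsIn qualified_groups p.2)))
    (fun x => x.2.length) false
  match matchBAssign allowed PySem.Set.empty with
  | some pairs => (PySem.Dict.ofList pairs).items              -- return dict(pairs)
  | none => []                                                 -- Python raises RuntimeError (outside Pre_)

-- ===== PRECONDITION & SPEC =====
-- Pre_ excludes (a) inputs with no injective choice of one qualified group per slot, on which A
-- raises RuntimeError, and (b) slot lists with duplicate indices, on which A's dict keyed by idx
-- makes backtracking frames overwrite/delete each other's entries (A may return an accidentally
-- reordered dict or raise KeyError there).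
def Pre_match_thirds_py (slots : List (Int × String)) (qualified_groups : List String) : Prop :=
  (slots.map Prod.fst).Nodup ∧
  ∃ l ∈ (slots.map (fun p => pyGroupsIn qualified_groups p.2)).sections, l.Nodup
instance (slots : List (Int × String)) (qualified_groups : List String) : Decidable (Pre_match_thirds_py slots qualified_groups) := by unfold Pre_match_thirds_py; infer_instance

def pvWitness_match_thirds_py : (List (Int × String)) × List String :=
  ([(1, "3_ABC"), (2, "3_BC"), (3, "3_C")], ["A", "B", "C"])

def Spec_match_thirds_py (slots : List (Int × String)) (qualified_groups : List String) (out : List (Int × String)) : Prop := out = match_thirds_py_alt slots qualified_groups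
instance (slots : List (Int × String)) (qualified_groups : List String) (out : List (Int × String)) : Decidable (Spec_match_thirds_py slots qualified_groups out) := by unfold Spec_match_thirds_py; infer_instance

-- ===== CLAIM (what is proved, stated in full; the proofs are below) =====
def Claim_equal_match_thirds_py : Prop := ∀ (slots : List (Int × String)) (qualified_groups : List String), Dom_match_thirds_py slots qualified_groups → Pre_match_thirds_py slots qualified_groups → Spec_match_thirds_py slots qualified_groups (match_thirds_py slots qualified_groups)

-- ===== LEMMAS AND PROOFS =====

-- B's pairs-building recursion succeeds exactly where B's feasibility oracle says yes.
lemma matchBAssign_isSome (rest : List (Int × List String)) :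
    ∀ (used : PySem.Set String),
      (matchBAssign rest used).isSome = matchBFeasible rest used := by
  induction rest with
  | nil => intro used; simp [matchBAssign, matchBFeasible]
  | cons hd tl ih =>
    obtain ⟨idx, cands⟩ := hd
    intro used
    simp only [matchBAssign, matchBFeasible]
    cases hf : cands.find? (fun g => !used.contains g && matchBFeasible tl (PySem.Set.add used g)) with
    | none =>
      rw [List.find?_eq_none] at hf
      simp only [Option.isSome_none]
      symm
      rw [List.any_eq_false]
      exact hf
    | some g =>
      have hp := List.find?_some hf
      have hmem := List.mem_of_find?_eq_some hf
      simp only [Option.isSome_map, ih, (Bool.and_eq_true _ _).mp hp |>.2]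
      symm
      rw [List.any_eq_true]
      exact ⟨g, hmem, hp⟩

-- A's threaded backtracking equals B's greedy-with-oracle search, with the assignment dict
-- folded in afterwards.
lemma matchA_eq_matchB (rest : List (Int × List String)) :
    ∀ (d : PySem.Dict Int String) (used : PySem.Set String),
      matchABacktrack rest d used =
        (matchBAssign rest used).map (fun l => l.foldl (fun d p => d.insert p.1 p.2) d) := by
  induction rest with
  | nil => intro d used; simp [matchABacktrack, matchBAssign]
  | cons hd tl ih =>
    obtain ⟨idx, cands⟩ := hd
    intro d used
    simp only [matchABacktrack, matchBAssign]
    induction cands with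
    | nil => simp
    | cons g gs ihg =>
      rw [List.foldr_cons, List.find?_cons]
      cases hb : (!used.contains g && matchBFeasible tl (PySem.Set.add used g)) with
      | false =>
        by_cases hc : used.contains g = true
        · have hcne : ¬ used.contains g = false := by rw [hc]; decide
          rw [if_neg hcne]
          exact ihg
        · have hc' : used.contains g = false := Bool.not_eq_true _ ▸ hc
          have hfeas : matchBFeasible tl (PySem.Set.add used g) = false := by
            cases hq : matchBFeasible tl (PySem.Set.add used g) with
            | false => rfl
            | true => rw [hc', hq] at hb; simp at hb
          have hnone : matchBAssign tl (PySem.Set.add used g) = none := by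
            cases hx : matchBAssign tl (PySem.Set.add used g) with
            | none => rfl
            | some l =>
              have := matchBAssign_isSome tl (PySem.Set.add used g)
              rw [hx, hfeas] at this; simp at this
          rw [if_pos hc', ih, hnone]
          simpa using ihg
      | true =>
        have hc' : used.contains g = false := by
          cases hq : used.contains g with
          | false => rfl
          | true => rw [hq] at hb; simp at hb
        have hfeas : matchBFeasible tl (PySem.Set.add used g) = true := by
          cases hq : matchBFeasible tl (PySem.Set.add used g) with
          | true => rfl
          | false => rw [hq] at hb; simp at hb
        have hs : (matchBAssign tl (PySem.Set.add used g)).isSome = true := by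
          rw [matchBAssign_isSome]; exact hfeas
        obtain ⟨l, hl⟩ := Option.isSome_iff_exists.mp hs
        rw [if_pos hc', ih, hl]
        simp only [Option.map_some]
        rw [hl]
        rfl

theorem match_thirds_py_spec_aux (slots : List (Int × String)) (qualified_groups : List String) :
    match_thirds_py slots qualified_groups = match_thirds_py_alt slots qualified_groups := by
  unfold match_thirds_py match_thirds_py_alt
  simp only [PySem.List.foldl_append_singleton_eq_map, List.nil_append]
  rw [matchA_eq_matchB]
  cases matchBAssign (PySem.List.sorted (slots.map fun p => (p.1, pyGroupsIn qualified_groups p.2))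
      (fun x => x.2.length) false) PySem.Set.empty with
  | some l => rfl
  | none => rfl

-- ===== VERDICT (by name: the statement is the Claim_ definition above) =====
theorem match_thirds_py_spec : Claim_equal_match_thirds_py := by
  intro slots qualified_groups _ _
  exact match_thirds_py_spec_aux slots qualified_groups
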